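-- pv_equiv track=rewrite | github.com/IncompleteInformation/NBA_Alternate_Scoring | NBAcalculate.py | calculateBonusScores
-- ===== SOURCE A (Python) =====
-- def calculateBonusScores(orderList):
--     t1Bonus,t2Bonus=0,0
--     streak=1
--     prev = None
--     for e in orderList:
--         if e==prev:
--             if e=="team1":
--                 t1Bonus+=streak
--             elif e=="team2":
--                 t2Bonus+=streak
--             streak+=1
--         else:
--             streak=1
--         prev = e
--
--     return [t1Bonus,t2Bonus]
-- ===== SOURCE B (Python) =====
-- def calculateBonusScores(orderList):
--     t1, t2 = 0, 0
--     i, n = 0, len(orderList)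
--     while i < n:
--         j = i + 1
--         while j < n and orderList[j] == orderList[i]:
--             j += 1
--         run = j - i
--         b = run * (run - 1) // 2
--         if orderList[i] == "team1":
--             t1 += b
--         elif orderList[i] == "team2":
--             t2 += b
--         i = j
--     return [t1, t2]
-- ===== Notes on version B (the rewrite author's own statement) =====
-- stated objective: simpler
-- what changed: Replaced the per-element streak accumulator with a run-length pass: each maximal run of equal elements contributes the closed-form triangular bonus run*(run-1)//2 to its team.
import Mathlib
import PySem

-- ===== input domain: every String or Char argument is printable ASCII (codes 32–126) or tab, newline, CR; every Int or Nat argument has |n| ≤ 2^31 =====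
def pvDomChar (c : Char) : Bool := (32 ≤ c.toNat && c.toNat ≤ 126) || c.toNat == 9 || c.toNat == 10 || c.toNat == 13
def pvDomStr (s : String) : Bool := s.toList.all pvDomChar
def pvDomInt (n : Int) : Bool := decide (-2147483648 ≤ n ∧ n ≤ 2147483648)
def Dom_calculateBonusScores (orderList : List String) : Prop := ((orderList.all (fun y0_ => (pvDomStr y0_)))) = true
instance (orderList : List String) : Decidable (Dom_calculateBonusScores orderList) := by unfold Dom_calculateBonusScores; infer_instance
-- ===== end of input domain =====

-- ===== PORT A =====
-- One honest line: B replaces A's per-element streak accumulator with a run-length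
-- decomposition and a closed-form triangular bonus per run (objective: simpler).
def calcStep (st : Int × Int × Int × Option String) (e : String) :
    Int × Int × Int × Option String :=
  match st with
  | (t1, t2, streak, prev) =>
    if prev = some e then
      if e = "team1" then (t1 + streak, t2, streak + 1, some e)
      else if e = "team2" then (t1, t2 + streak, streak + 1, some e)
      else (t1, t2, streak + 1, some e)
    else (t1, t2, (1 : Int), some e)

def calculateBonusScores (orderList : List String) : List Int :=
  let st := orderList.foldl calcStep (0, 0, 1, none)
  [st.1, st.2.1]

-- ===== PORT B =====
-- inner while loop: scan the maximal run of elements equal to the head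
def altGo : List String → Int → Int → List Int
  | [], t1, t2 => [t1, t2]
  | x :: xs, t1, t2 =>
    let run : Nat := 1 + (xs.takeWhile (fun y => y = x)).length
    let b : Int := ((run * (run - 1)) / 2 : Nat)
    let rest := xs.dropWhile (fun y => y = x)
    if x = "team1" then altGo rest (t1 + b) t2
    else if x = "team2" then altGo rest t1 (t2 + b)
    else altGo rest t1 t2
termination_by l => l.length
decreasing_by all_goals
  simp only [List.length_cons]
  exact Nat.lt_succ_of_le (List.length_dropWhile_le _ _)

def calculateBonusScores_alt (orderList : List String) : List Int :=
  altGo orderList 0 0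

-- ===== PRECONDITION & SPEC =====
def Spec_calculateBonusScores (orderList : List String) (out : List Int) : Prop := out = calculateBonusScores_alt orderList
instance (orderList : List String) (out : List Int) : Decidable (Spec_calculateBonusScores orderList out) := by unfold Spec_calculateBonusScores; infer_instance

-- ===== CLAIM (what is proved, stated in full; the proofs are below) =====
def Claim_equal_calculateBonusScores : Prop := ∀ (orderList : List String), Dom_calculateBonusScores orderList → Spec_calculateBonusScores orderList (calculateBonusScores orderList)

-- ===== LEMMAS AND PROOFS =====

/-- The sum streak + (streak+1) + ... over n equal elements, as A accumulates it. -/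
def streakSum (s : Int) : Nat → Int
  | 0 => 0
  | n + 1 => s + streakSum (s + 1) n

theorem two_mul_tri (n : Nat) : 2 * (n * (n - 1) / 2) = n * (n - 1) := by
  have h : 2 ∣ n * (n - 1) := by
    rcases n with _ | m
    · simp
    · simpa [Nat.mul_comm] using (Nat.even_mul_succ_self m).two_dvd
  exact Nat.mul_div_cancel' h

theorem streakSum_eq (n : Nat) : ∀ s : Int,
    streakSum s n = n * s + ((n * (n - 1)) / 2 : Nat) := by
  induction n with
  | zero => intro s; simp [streakSum]
  | succ n ih =>
    intro s
    have h : ((n + 1) * ((n + 1) - 1) / 2 : Nat) = (n * (n - 1) / 2 : Nat) + n := by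
      have a1 := two_mul_tri (n + 1)
      have a2 := two_mul_tri n
      have a3 : (n + 1) * ((n + 1) - 1) = n * (n - 1) + 2 * n := by
        rcases n with _ | m
        · rfl
        · simp only [Nat.add_sub_cancel]; ring
      omega
    rw [streakSum, ih (s + 1), h]
    push_cast [Nat.cast_add]
    ring

theorem streakSum_one (k : Nat) : streakSum 1 k = (((1 + k) * ((1 + k) - 1)) / 2 : Nat) := by
  rw [streakSum_eq]
  have h : ((1 + k) * ((1 + k) - 1)) / 2 = k * (k - 1) / 2 + k := by
    have a1 := two_mul_tri (1 + k)
    have a2 := two_mul_tri k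
    have a3 : (1 + k) * ((1 + k) - 1) = k * (k - 1) + 2 * k := by
      rcases k with _ | m
      · rfl
      · have e : (1 + (m + 1)) - 1 = m + 1 := by omega
        rw [e]
        simp only [Nat.add_sub_cancel]
        ring
    omega
  rw [h]
  push_cast
  ring

/-- A's fold over a run of elements all equal to the current prev `x`. -/
theorem fold_run (x : String) : ∀ (ys : List String), (∀ y ∈ ys, y = x) →
    ∀ (t1 t2 s : Int),
    ys.foldl calcStep (t1, t2, s, some x) =
      (if x = "team1" then (t1 + streakSum s ys.length, t2, s + ys.length, some x)
       else if x = "team2" then (t1, t2 + streakSum s ys.length, s + ys.length, some x)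
       else (t1, t2, s + ys.length, some x)) := by
  intro ys
  induction ys with
  | nil => intro _ t1 t2 s; split_ifs <;> simp [streakSum]
  | cons y ys ih =>
    intro h t1 t2 s
    have hy : y = x := h y (by simp)
    subst hy
    have hrec := ih (fun z hz => h z (by simp [hz])) 
    simp only [List.foldl_cons, calcStep, if_true]
    by_cases h1 : y = "team1"
    · simp only [if_pos h1]
      rw [hrec (t1 + s) t2 (s + 1), if_pos h1]
      simp only [List.length_cons, streakSum, Prod.mk.injEq]
      refine ⟨?_, ?_, ?_, ?_⟩ <;> first | trivial | (push_cast; ring)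
    · by_cases h2 : y = "team2"
      · simp only [if_neg h1, if_pos h2]
        rw [hrec t1 (t2 + s) (s + 1), if_neg h1, if_pos h2]
        simp only [List.length_cons, streakSum, Prod.mk.injEq]
        refine ⟨?_, ?_, ?_, ?_⟩ <;> first | trivial | (push_cast; ring)
      · simp only [if_neg h1, if_neg h2]
        rw [hrec t1 t2 (s + 1), if_neg h1, if_neg h2]
        simp only [List.length_cons, Prod.mk.injEq]
        refine ⟨?_, ?_, ?_, ?_⟩ <;> first | trivial | (push_cast; ring)
  
/-- Main invariant: from any boundary state (prev differs from the head), A's fold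
    computes what B's run-length recursion computes. -/
theorem go_eq (n : Nat) : ∀ (l : List String), l.length ≤ n →
    ∀ (t1 t2 s : Int) (p : Option String),
    (∀ x, l.head? = some x → p ≠ some x) →
    (let st := l.foldl calcStep (t1, t2, s, p); [st.1, st.2.1]) = altGo l t1 t2 := by
  induction n with
  | zero =>
    intro l hl
    have : l = [] := by cases l <;> simp_all
    subst this
    intro t1 t2 s p _
    simp [altGo]
  | succ n ih =>
    intro l hl t1 t2 s p hp
    cases l with
    | nil => simp [altGo]
    | cons x xs =>
      have hpx : p ≠ some x := hp x (by simp)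
      have hsplit : xs.takeWhile (fun y => decide (y = x)) ++
          xs.dropWhile (fun y => decide (y = x)) = xs :=
        List.takeWhile_append_dropWhile
      have hall : ∀ y ∈ xs.takeWhile (fun y => decide (y = x)), y = x := by
        intro y hy
        have hp := List.mem_takeWhile_imp (p := fun y => decide (y = x)) (l := xs) hy
        simpa using hp
      have hhead : ∀ z, (xs.dropWhile (fun y => decide (y = x))).head? = some z →
          (some x : Option String) ≠ some z := by
        intro z hz hxz
        have hnot := List.head?_dropWhile_not (fun y => decide (y = x)) xs
        rw [hz] at hnot
        simp at hnot
        have hxz' : z = x := by injection hxz with h; exact h.symm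
        exact hnot hxz'
      have hlen : (xs.dropWhile (fun y => decide (y = x))).length ≤ n := by
        have := List.length_dropWhile_le (p := fun y => decide (y = x)) (l := xs)
        simp at hl
        omega
      have hIH := ih (xs.dropWhile (fun y => decide (y = x))) hlen
      have hb := streakSum_one (xs.takeWhile (fun y => decide (y = x))).length
      simp only [List.foldl_cons, calcStep, if_neg hpx]
      have hA : List.foldl calcStep (t1, t2, 1, some x) xs =
          List.foldl calcStep
            (if x = "team1" then
              (t1 + streakSum 1 (xs.takeWhile (fun y => decide (y = x))).length, t2,
               1 + ((xs.takeWhile (fun y => decide (y = x))).length : Int), some x)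
             else if x = "team2" then
              (t1, t2 + streakSum 1 (xs.takeWhile (fun y => decide (y = x))).length,
               1 + ((xs.takeWhile (fun y => decide (y = x))).length : Int), some x)
             else
              (t1, t2, 1 + ((xs.takeWhile (fun y => decide (y = x))).length : Int), some x))
            (xs.dropWhile (fun y => decide (y = x))) := by
        conv_lhs => rw [← hsplit]
        rw [List.foldl_append, fold_run x _ hall t1 t2 1]
      rw [hA]
      simp only [altGo]
      by_cases h1 : x = "team1"
      · rw [if_pos h1, if_pos h1, ← hb]
        exact hIH _ _ _ _ hhead
      · by_cases h2 : x = "team2"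
        · rw [if_neg h1, if_pos h2, if_neg h1, if_pos h2, ← hb]
          exact hIH _ _ _ _ hhead
        · rw [if_neg h1, if_neg h2, if_neg h1, if_neg h2]
          exact hIH _ _ _ _ hhead

-- ===== VERDICT (by name: the statement is the Claim_ definition above) =====
theorem calculateBonusScores_spec : Claim_equal_calculateBonusScores := by
  intro l _
  unfold Spec_calculateBonusScores calculateBonusScores calculateBonusScores_alt
  exact go_eq l.length l (le_refl _) 0 0 1 none (fun x _ => by simp)
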